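-- pv_equiv track=rewrite | github.com/yijieshufu/Algorithm | 算法学习/贪心与思维专练/01串.py | get_len
-- ===== SOURCE A (Python) =====
-- def get_len(n):
--     if n < 0: return 0
--     res = 1 # 数字 0 占 1 位
--     if n == 0: return res
--     l, r, bit = 1, 1, 1  # l,r位数的起点  bit这层数有多少位
--     while r <= n:
--         res += (r - l + 1) * bit  # 个数 * 每个数的位数 = 长度
--         bit += 1 #进行下一层的数
--         l = r + 1 # 下一层的起点是上一层的终点+1
--         r = (l << 1) - 1 # 下一层的终点 是 起点左移1位再-1
--     if l <= n:
--         res += (n - l + 1) * bit  # 剩下的长度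
--     return res
-- ===== SOURCE B (Python) =====
-- def get_len(n):
--     # closed form: sum of bit lengths of 1..n is (n+1)*b - (2**b - 1), plus 1 digit for 0
--     if n < 0:
--         return 0
--     b = n.bit_length()
--     return (n + 1) * b - (2 ** b - 1) + 1
-- ===== Notes on version B (the rewrite author's own statement) =====
-- stated objective: faster
-- what changed: Replaces A's per-bit-width while loop that accumulates count*width per level with the closed-form formula (n+1)*bit_length(n) - (2^bit_length(n) - 1) + 1.
import Mathlib
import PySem

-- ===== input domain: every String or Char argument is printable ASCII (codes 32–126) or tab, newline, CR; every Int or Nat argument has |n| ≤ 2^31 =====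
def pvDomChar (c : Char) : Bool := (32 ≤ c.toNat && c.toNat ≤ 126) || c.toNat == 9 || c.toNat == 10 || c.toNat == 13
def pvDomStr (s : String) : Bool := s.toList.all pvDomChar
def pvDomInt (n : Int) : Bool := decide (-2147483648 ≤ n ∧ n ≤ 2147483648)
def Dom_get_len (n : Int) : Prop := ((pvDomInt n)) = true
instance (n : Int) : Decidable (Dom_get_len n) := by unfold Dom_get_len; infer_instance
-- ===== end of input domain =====

-- B replaces A's per-bit-width accumulation loop with the closed form
-- (n+1)*bit_length(n) - (2^bit_length(n) - 1) + 1 (objective: faster, constant-time arithmetic).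

-- ===== PORT A =====
-- A's `while r <= n` loop over bit-width levels; fuel only makes the recursion total
-- (64 iterations always suffice on Dom since r doubles each step).
def get_lenLoop : Nat → Int → Int → Int → Int → Int → Int × Int × Int
  | 0, _, res, l, _, bit => (res, l, bit)
  | fuel + 1, n, res, l, r, bit =>
    if r ≤ n then
      get_lenLoop fuel n (res + (r - l + 1) * bit) (r + 1) ((r + 1) * 2 - 1) (bit + 1)
    else
      (res, l, bit)

def get_len (n : Int) : Int :=
  if n < 0 then 0
  else if n = 0 then 1
  else
    let s := get_lenLoop 64 n 1 1 1 1   -- s = (res, l, bit) after the while loop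
    if s.2.1 ≤ n then s.1 + (n - s.2.1 + 1) * s.2.2 else s.1

-- ===== PORT B =====
-- Nat.size is Lean's counterpart of Python's int.bit_length() on nonnegative ints.
def get_len_alt (n : Int) : Int :=
  if n < 0 then 0
  else
    let b := Nat.size n.toNat
    (n + 1) * (b : Int) - (2 ^ b - 1) + 1

-- ===== PRECONDITION & SPEC =====
def Spec_get_len (n : Int) (out : Int) : Prop := out = get_len_alt n
instance (n : Int) (out : Int) : Decidable (Spec_get_len n out) := by unfold Spec_get_len; infer_instance

-- ===== CLAIM (what is proved, stated in full; the proofs are below) =====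
def Claim_equal_get_len : Prop := ∀ (n : Int), Dom_get_len n → Spec_get_len n (get_len n)

-- ===== LEMMAS AND PROOFS =====

-- S m = sum of bit lengths of 1..m
def S : Nat → Int
  | 0 => 0
  | m + 1 => S m + (Nat.size (m + 1) : Int)

theorem size_eq_of_bounds (b m : Nat) (hb : 1 ≤ b) (h1 : 2 ^ (b - 1) ≤ m) (h2 : m < 2 ^ b) :
    Nat.size m = b := by
  have hle : Nat.size m ≤ b := Nat.size_le.mpr h2
  have hlt : b - 1 < Nat.size m := Nat.lt_size.mpr h1
  omega

theorem S_partial (b : Nat) (hb : 1 ≤ b) :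
    ∀ d : Nat, 2 ^ (b - 1) - 1 + d < 2 ^ b →
      S (2 ^ (b - 1) - 1 + d) = S (2 ^ (b - 1) - 1) + (d : Int) * (b : Int) := by
  intro d
  induction d with
  | zero => intro _; simp
  | succ d ih =>
    intro hd
    have hp : 1 ≤ 2 ^ (b - 1) := Nat.one_le_two_pow
    have h1 : 2 ^ (b - 1) - 1 + (d + 1) = (2 ^ (b - 1) - 1 + d) + 1 := by omega
    rw [h1]
    show S (2 ^ (b - 1) - 1 + d) + (Nat.size (2 ^ (b - 1) - 1 + d + 1) : Int) = _
    rw [ih (by omega)]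
    rw [size_eq_of_bounds b (2 ^ (b - 1) - 1 + d + 1) hb (by omega) (by omega)]
    push_cast
    ring

theorem S_pow : ∀ b : Nat, S (2 ^ b - 1) = ((b : Int) - 1) * 2 ^ b + 1 := by
  intro b
  induction b with
  | zero => simp [S]
  | succ b ih =>
    have hsplit : 2 ^ (b + 1) - 1 = 2 ^ ((b + 1) - 1) - 1 + 2 ^ b := by
      have : 1 ≤ 2 ^ b := Nat.one_le_two_pow
      simp only [Nat.add_sub_cancel]
      omega
    rw [hsplit, S_partial (b + 1) (by omega) (2 ^ b)
        (by have : 1 ≤ 2 ^ b := Nat.one_le_two_pow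
            simp only [Nat.add_sub_cancel]
            omega)]
    simp only [Nat.add_sub_cancel]
    rw [ih]
    push_cast [pow_succ]
    ring

theorem S_closed (m : Nat) :
    S m = ((m : Int) + 1) * (Nat.size m : Int) - 2 ^ (Nat.size m) + 1 := by
  rcases Nat.eq_zero_or_pos m with h0 | hpos
  · subst h0; simp [S]
  · obtain ⟨c, hc⟩ : ∃ c, Nat.size m = c + 1 :=
      ⟨Nat.size m - 1, by
        have := Nat.lt_size.mpr (show 2 ^ 0 ≤ m by simpa using hpos)
        omega⟩
    have hub : m < 2 ^ (c + 1) := hc ▸ Nat.lt_size_self m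
    have hlb : 2 ^ c ≤ m := Nat.lt_size.mp (by omega)
    have hp : (1 : Nat) ≤ 2 ^ c := Nat.one_le_two_pow
    have hm : m = 2 ^ c - 1 + (m - 2 ^ c + 1) := by omega
    have key := S_partial (c + 1) (by omega) (m - 2 ^ c + 1) (by
      simp only [Nat.add_sub_cancel]; omega)
    simp only [Nat.add_sub_cancel] at key
    rw [hc, hm, key, S_pow]
    push_cast [Nat.cast_sub hlb, Nat.cast_sub hp, pow_succ]
    ring

-- tail s n = A's post-loop step `if l <= n: res += (n - l + 1) * bit; return res`
def tail (s : Int × Int × Int) (n : Int) : Int :=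
  if s.2.1 ≤ n then s.1 + (n - s.2.1 + 1) * s.2.2 else s.1

theorem loop_tail (fuel : Nat) :
    ∀ (b m : Nat) (res : Int), 1 ≤ b → 2 ^ (b - 1) ≤ m + 1 → m < 2 ^ (b - 1 + fuel) →
      tail (get_lenLoop fuel (m : Int) res ((2 : Int) ^ (b - 1)) ((2 : Int) ^ b - 1) (b : Int)) (m : Int)
        = res + (S m - S (2 ^ (b - 1) - 1)) := by
  induction fuel with
  | zero =>
    intro b m res hb h2 h3
    simp only [Nat.add_zero] at h3
    have hm : m = 2 ^ (b - 1) - 1 := by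
      have : 1 ≤ 2 ^ (b - 1) := Nat.one_le_two_pow
      omega
    have hnot : ¬ ((2 : Int) ^ (b - 1) ≤ (m : Int)) := by
      have : (m : Int) < (2 : Int) ^ (b - 1) := by exact_mod_cast h3
      omega
    simp [get_lenLoop, tail, hm]
  | succ fuel ih =>
    intro b m res hb h2 h3
    have hp : 1 ≤ 2 ^ (b - 1) := Nat.one_le_two_pow
    have hpb : (1 : Nat) ≤ 2 ^ b := Nat.one_le_two_pow
    by_cases hcond : (2 : Int) ^ b - 1 ≤ (m : Int)
    · -- one full level, recurse at bit b+1
      have hbn : 2 ^ b ≤ m + 1 := by exact_mod_cast (by omega : (2 : Int) ^ b ≤ (m : Int) + 1)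
      rw [get_lenLoop, if_pos hcond]
      have e1 : (2 : Int) ^ b - 1 + 1 = (2 : Int) ^ b := by ring
      rw [e1]
      have e4 : ((2 : Int) ^ b) * 2 - 1 = (2 : Int) ^ (b + 1) - 1 := by rw [pow_succ]
      rw [e4]
      have e3 : ((b : Int) + 1) = ((b + 1 : Nat) : Int) := by push_cast; ring_nf
      rw [e3]
      have step := ih (b + 1) m (res + ((2 : Int) ^ b - 1 - (2 : Int) ^ (b - 1) + 1) * (b : Int))
        (by omega) (by simpa using hbn) (by
          have h' : b - 1 + (fuel + 1) = (b + 1) - 1 + fuel := by omega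
          rw [← h']; exact h3)
      simp only [Nat.add_sub_cancel] at step
      rw [step]
      -- level sum: S (2^b - 1) = S (2^(b-1) - 1) + 2^(b-1) * b
      obtain ⟨c, hc⟩ : ∃ c, b = c + 1 := ⟨b - 1, by omega⟩
      subst hc
      simp only [Nat.add_sub_cancel] at *
      have hsplit : 2 ^ (c + 1) - 1 = 2 ^ c - 1 + 2 ^ c := by
        have : 2 ^ (c + 1) = 2 ^ c + 2 ^ c := by rw [pow_succ]; omega
        have hpc : (1 : Nat) ≤ 2 ^ c := Nat.one_le_two_pow
        omega
      have hlevel := S_partial (c + 1) (by omega) (2 ^ c) (by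
        simp only [Nat.add_sub_cancel]
        have : 2 ^ (c + 1) = 2 ^ c + 2 ^ c := by rw [pow_succ]; omega
        have hpc : (1 : Nat) ≤ 2 ^ c := Nat.one_le_two_pow
        omega)
      simp only [Nat.add_sub_cancel] at hlevel
      rw [← hsplit] at hlevel
      rw [hlevel]
      push_cast [pow_succ]
      ring
    · -- loop exits; trailing partial level
      rw [get_lenLoop, if_neg hcond]
      have hub : m < 2 ^ b := by exact_mod_cast (by omega : (m : Int) < (2 : Int) ^ b)
      by_cases hl : (2 : Int) ^ (b - 1) ≤ (m : Int)
      · have hlb : 2 ^ (b - 1) ≤ m := by exact_mod_cast hl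
        have hm : m = 2 ^ (b - 1) - 1 + (m - 2 ^ (b - 1) + 1) := by omega
        have key := S_partial b hb (m - 2 ^ (b - 1) + 1) (by omega)
        rw [← hm] at key
        simp only [tail, if_pos hl]
        rw [key]
        have hcast : ((m - 2 ^ (b - 1) + 1 : Nat) : Int) = (m : Int) - 2 ^ (b - 1) + 1 := by
          push_cast [Nat.cast_sub hlb]; ring
        rw [hcast]
        ring
      · have hm : m = 2 ^ (b - 1) - 1 := by
          have : m < 2 ^ (b - 1) := by exact_mod_cast (by omega : (m : Int) < (2 : Int) ^ (b - 1))
          omega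
        simp [tail, hm]

-- ===== VERDICT (by name: the statement is the Claim_ definition above) =====
theorem get_len_spec : Claim_equal_get_len := by
  intro n hdom
  unfold Spec_get_len get_len get_len_alt
  by_cases hneg : n < 0
  · simp [hneg]
  · by_cases h0 : n = 0
    · subst h0; norm_num
    · obtain ⟨m, hm⟩ : ∃ m : Nat, n = (m : Int) := ⟨n.toNat, by omega⟩
      subst hm
      have hbN : m ≤ 2147483648 := by
        unfold Dom_get_len pvDomInt at hdom
        simp at hdom
        exact hdom
      have key := loop_tail 64 1 m 1 (le_refl 1) (by simp)
        (by
          have : (2147483648 : Nat) < 2 ^ (1 - 1 + 64) := by norm_num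
          omega)
      norm_num [tail, S] at key
      rw [if_neg hneg, if_neg h0, if_neg hneg]
      show (if (get_lenLoop 64 ((m : Int)) 1 1 1 1).2.1 ≤ (m : Int) then
              (get_lenLoop 64 ((m : Int)) 1 1 1 1).1 +
                ((m : Int) - (get_lenLoop 64 ((m : Int)) 1 1 1 1).2.1 + 1) *
                  (get_lenLoop 64 ((m : Int)) 1 1 1 1).2.2
            else (get_lenLoop 64 ((m : Int)) 1 1 1 1).1)
          = ((m : Int) + 1) * ((((m : Int)).toNat.size : Nat) : Int) -
              (2 ^ (((m : Int)).toNat.size) - 1) + 1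
      rw [key]
      simp only [Int.toNat_natCast]
      rw [S_closed m]
      ring
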